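-- pv_equiv track=rewrite | github.com/pypi-data/pypi-mirror-56 | packages/pub.tools/pub.tools-3.0.2-py3-none-any.whl/pub/tools/citations.py | punctuate
-- ===== SOURCE A (Python) =====
-- punc_endings = ('.', '?', '!')
--
-- def punctuate(text, punctuation, space=''):
--     if not text:
--         return text
--     if punctuation in punc_endings and text[-1] in punc_endings:
--         return text + space
--     elif punctuation not in punc_endings and text[-1] == punctuation:
--         return text + space
--     elif text[-1] == ' ':
--         return punctuate(text.strip(), punctuation, space)
--     else:
--         return text + punctuation + space
-- ===== SOURCE B (Python) =====
-- punc_endings = ('.', '?', '!')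
--
-- def punctuate(text, punctuation, space=''):
--     # flat pass: strip at most once (trailing ' ' can't survive strip), then one combined check
--     if not text:
--         return text
--     if text[-1] == ' ' and punctuation != ' ':
--         text = text.strip()
--         if not text:
--             return text
--     last = text[-1]
--     matched = last in punc_endings if punctuation in punc_endings else punctuation == last
--     return text + (space if matched else punctuation + space)
-- ===== Notes on version B (the rewrite author's own statement) =====
-- stated objective: simpler
-- what changed: Replaced A's self-recursion (strip trailing-space text and retry the whole function) with a flat single pass: strip at most once up front (a stripped string can never end in ' ' again), then one combined punctuation check instead of A's three-branch chain plus recursive call.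
import Mathlib
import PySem

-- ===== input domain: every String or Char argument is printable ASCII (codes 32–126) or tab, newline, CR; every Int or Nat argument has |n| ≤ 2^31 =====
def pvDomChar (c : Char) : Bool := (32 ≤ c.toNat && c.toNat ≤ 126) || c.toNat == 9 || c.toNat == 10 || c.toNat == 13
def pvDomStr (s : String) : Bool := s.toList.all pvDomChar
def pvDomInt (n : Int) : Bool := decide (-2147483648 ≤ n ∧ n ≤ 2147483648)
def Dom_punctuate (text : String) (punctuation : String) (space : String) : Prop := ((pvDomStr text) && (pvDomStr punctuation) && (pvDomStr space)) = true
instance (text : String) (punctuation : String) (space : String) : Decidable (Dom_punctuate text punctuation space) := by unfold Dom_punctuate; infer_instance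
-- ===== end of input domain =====

-- B replaces A's self-recursion (strip-then-retry) by a flat single-pass guard with one combined
-- punctuation check; objective: simpler (no recursion), same cost.

-- punc_endings = ('.', '?', '!') — as the tuple of 1-char strings (for `punctuation in punc_endings`)
def puncEndings : List (List Char) := [['.'], ['?'], ['!']]
-- the same tuple seen by `text[-1] in punc_endings` (a char compared with 1-char strings)
def puncEndingChars : List Char := ['.', '?', '!']

-- termination fact for port A: stripping a string whose last char is ' ' shortens it
theorem strip_length_lt_of_last_space (t : List Char) (h : t ≠ [])
    (hl : PySem.List.pyGetD t (-1) ' ' = ' ') :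
    (PySem.Chars.strip t).length < t.length := by
  have hlast : t.getLast? = some ' ' := by
    rw [PySem.List.pyGetD_neg_one t ' ' h] at hl
    rw [List.getLast?_eq_some_getLast h, hl]
  have hlen : 0 < t.length := List.length_pos_iff.mpr h
  unfold PySem.Chars.strip PySem.Chars.rstrip PySem.Chars.lstrip
  by_cases hnil : List.dropWhile PySem.Chars.isspace t = []
  · rw [hnil]; simpa using hlen
  · obtain ⟨pre, hpre⟩ : List.dropWhile PySem.Chars.isspace t <:+ t := List.dropWhile_suffix _
    have hlast2 : (List.dropWhile PySem.Chars.isspace t).getLast? = some ' ' := by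
      have hap := List.getLast?_append_of_ne_nil pre hnil
      rw [hpre] at hap
      rw [← hap]; exact hlast
    cases hrev : (List.dropWhile PySem.Chars.isspace t).reverse with
    | nil => exact absurd (by simpa using hrev) hnil
    | cons d rs =>
      have hd : d = ' ' := by
        have h2 := List.getLast?_eq_head?_reverse (xs := List.dropWhile PySem.Chars.isspace t)
        rw [hlast2, hrev] at h2; simpa using h2.symm
      have hsp : PySem.Chars.isspace d = true := by rw [hd]; decide
      rw [List.dropWhile_cons_of_pos hsp]
      have h3 : (List.dropWhile PySem.Chars.isspace rs).length ≤ rs.length :=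
        List.length_dropWhile_le _ _
      have h4 : rs.length + 1 = (List.dropWhile PySem.Chars.isspace t).length := by
        have := congrArg List.length hrev; simp at this; omega
      have h5 : (List.dropWhile PySem.Chars.isspace t).length ≤ t.length := by
        have := congrArg List.length hpre; simp at this; omega
      simp only [List.length_reverse]; omega

-- ===== PORT A =====
def punctuateChars (t p sp : List Char) : List Char :=
  if h : t = [] then t
  else if p ∈ puncEndings ∧ PySem.List.pyGetD t (-1) ' ' ∈ puncEndingChars then t ++ sp
  else if p ∉ puncEndings ∧ p = [PySem.List.pyGetD t (-1) ' '] then t ++ sp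
  else if PySem.List.pyGetD t (-1) ' ' = ' ' then punctuateChars (PySem.Chars.strip t) p sp
  else t ++ p ++ sp
termination_by t.length
decreasing_by exact strip_length_lt_of_last_space t h (by assumption)

def punctuate (text : String) (punctuation : String) (space : String) : String :=
  String.mk (punctuateChars text.toList punctuation.toList space.toList)

-- ===== PORT B =====
def punctuateAltChars (t p sp : List Char) : List Char :=
  if t = [] then t
  else
    let t' := if PySem.List.pyGetD t (-1) ' ' = ' ' ∧ p ≠ [' '] then PySem.Chars.strip t else t
    if t' = [] then t'
    else
      let last := PySem.List.pyGetD t' (-1) ' '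
      let matched := if p ∈ puncEndings then last ∈ puncEndingChars else p = [last]
      if matched then t' ++ sp else t' ++ p ++ sp

def punctuate_alt (text : String) (punctuation : String) (space : String) : String :=
  String.mk (punctuateAltChars text.toList punctuation.toList space.toList)

-- ===== PRECONDITION & SPEC =====
def Spec_punctuate (text : String) (punctuation : String) (space : String) (out : String) : Prop := out = punctuate_alt text punctuation space
instance (text : String) (punctuation : String) (space : String) (out : String) : Decidable (Spec_punctuate text punctuation space out) := by unfold Spec_punctuate; infer_instance

-- ===== CLAIM (what is proved, stated in full; the proofs are below) =====
def Claim_equal_punctuate : Prop := ∀ (text : String) (punctuation : String) (space : String), Dom_punctuate text punctuation space → Spec_punctuate text punctuation space (punctuate text punctuation space)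

-- ===== LEMMAS AND PROOFS =====

-- the last character of a stripped string is never whitespace
theorem strip_getLast?_not_space (t : List Char) (c : Char)
    (h : (PySem.Chars.strip t).getLast? = some c) : PySem.Chars.isspace c = false := by
  unfold PySem.Chars.strip PySem.Chars.rstrip at h
  rw [List.getLast?_reverse] at h
  have := List.head?_dropWhile_not PySem.Chars.isspace (PySem.Chars.lstrip t).reverse
  rw [h] at this; simpa using this

theorem strip_last_ne_space (t : List Char) (h : PySem.Chars.strip t ≠ []) :
    PySem.List.pyGetD (PySem.Chars.strip t) (-1) ' ' ≠ ' ' := by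
  rw [PySem.List.pyGetD_neg_one _ ' ' h]
  intro hc
  have := strip_getLast?_not_space t _ (List.getLast?_eq_some_getLast h)
  rw [hc] at this
  exact absurd this (by decide)

-- one-shot agreement: if the last char is not ' ', A takes no recursive step
theorem oneshot (t p sp : List Char) (h : t ≠ [])
    (hl : PySem.List.pyGetD t (-1) ' ' ≠ ' ') :
    punctuateChars t p sp =
      if (if p ∈ puncEndings then PySem.List.pyGetD t (-1) ' ' ∈ puncEndingChars
          else p = [PySem.List.pyGetD t (-1) ' ']) then t ++ sp else t ++ p ++ sp := by
  rw [punctuateChars, dif_neg h]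
  by_cases hp : p ∈ puncEndings
  · by_cases hc : PySem.List.pyGetD t (-1) ' ' ∈ puncEndingChars
    · simp [hp, hc]
    · simp [hp, hc, hl]
  · by_cases he : p = [PySem.List.pyGetD t (-1) ' ']
    · have hpe : [PySem.List.pyGetD t (-1) ' '] ∉ puncEndings := he ▸ hp
      simp [he, hpe]
    · simp [hp, he, hl]

theorem chars_eq (t p sp : List Char) : punctuateChars t p sp = punctuateAltChars t p sp := by
  by_cases h0 : t = []
  · subst h0; rw [punctuateChars]; simp [punctuateAltChars]
  · by_cases hl : PySem.List.pyGetD t (-1) ' ' = ' '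
    · by_cases hp : p = [' ']
      · -- punctuation == ' ' == text[-1]: both return text + space, no strip
        subst hp
        rw [punctuateChars]
        simp [punctuateAltChars, h0, hl, puncEndings, puncEndingChars]
      · -- A recurses on the stripped text; B strips once and finishes
        rw [punctuateChars]
        have hc : PySem.List.pyGetD t (-1) ' ' ∉ puncEndingChars := by rw [hl]; decide
        have hb2 : ¬(¬p ∈ puncEndings ∧ p = [PySem.List.pyGetD t (-1) ' ']) := by
          rw [hl]; rintro ⟨_, hx⟩; exact hp hx
        rw [dif_neg h0, if_neg (fun hx => hc hx.2), if_neg hb2, if_pos hl]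
        by_cases hs : PySem.Chars.strip t = []
        · rw [punctuateChars]
          simp [punctuateAltChars, h0, hl, hp, hs]
        · rw [oneshot (PySem.Chars.strip t) p sp hs (strip_last_ne_space t hs)]
          simp [punctuateAltChars, h0, hl, hp, hs]
    · -- last char is not ' ': A takes no recursive step, B does not strip
      rw [oneshot t p sp h0 hl]
      simp [punctuateAltChars, h0, hl]

-- ===== VERDICT (by name: the statement is the Claim_ definition above) =====
theorem punctuate_spec : Claim_equal_punctuate := by
  intro text punctuation space _
  unfold Spec_punctuate punctuate punctuate_alt
  rw [chars_eq]
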